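-- pv_equiv track=rewrite | github.com/kirklan34/CriptografiaUDL | Pràctica 1/Ex3/test.py | guess_key
-- ===== SOURCE A (Python) =====
-- from collections import Counter
--
-- def guess_key(text, key_len, most_common_plain='e'):
--     key = ""
--     for i in range(key_len):
--         subtext = text[i::key_len]
--         freqs = Counter(subtext)
--         if not freqs:
--             key += '?'
--             continue
--         most_common_cipher, _ = freqs.most_common(1)[0]
--         shift = (ord(most_common_cipher) - ord(most_common_plain)) % 26
--         key_letter = chr(ord('a') + shift)
--         key += key_letter
--     return key
-- ===== SOURCE B (Python) =====
-- from collections import Counter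
--
-- def guess_key(text, key_len, most_common_plain='e'):
--     if key_len <= 0:
--         return ""
--     counts = [Counter() for _ in range(key_len)]
--     for idx, ch in enumerate(text):
--         counts[idx % key_len][ch] += 1
--     key_chars = []
--     for c in counts:
--         if not c:
--             key_chars.append('?')
--         else:
--             cipher, _ = c.most_common(1)[0]
--             shift = (ord(cipher) - ord(most_common_plain)) % 26
--             key_chars.append(chr(ord('a') + shift))
--     return "".join(key_chars)
-- ===== Notes on version B (the rewrite author's own statement) =====
-- stated objective: alternative
-- what changed: Instead of extracting key_len strided slices text[i::key_len] and building a Counter per slice, B makes a single pass over enumerate(text) bucketing each character into counts[idx % key_len], guards key_len <= 0 by returning '' immediately, and then reads the key off the buckets; insertion order into each bucket equals slice order, so most_common tie-breaking is identical.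
import Mathlib
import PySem

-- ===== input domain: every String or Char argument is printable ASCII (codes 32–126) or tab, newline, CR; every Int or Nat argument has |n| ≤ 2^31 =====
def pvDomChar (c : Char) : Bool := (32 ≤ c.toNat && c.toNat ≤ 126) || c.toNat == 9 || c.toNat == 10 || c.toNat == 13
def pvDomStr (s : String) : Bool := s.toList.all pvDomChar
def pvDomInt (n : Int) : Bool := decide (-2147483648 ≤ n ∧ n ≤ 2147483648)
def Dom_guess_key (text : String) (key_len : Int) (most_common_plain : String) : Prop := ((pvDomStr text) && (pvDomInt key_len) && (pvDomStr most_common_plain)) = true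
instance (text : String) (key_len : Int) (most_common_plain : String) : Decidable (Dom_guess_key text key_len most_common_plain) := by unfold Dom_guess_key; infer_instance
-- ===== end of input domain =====

-- B rebuilds the key in ONE pass over the text, bucketing characters by index mod key_len,
-- instead of A's per-position strided slices; objective: alternative decomposition, same exact output.

-- Shared port of the library call Counter.most_common(1)[0]: first item (in insertion order)
-- whose count is maximal (nlargest keeps the first among ties); none ↔ empty Counter.
def mostCommon1 (d : PySem.Dict Char Int) : Option (Char × Int) :=
  match d.items with
  | [] => none
  | it :: rest => some (rest.foldl (fun b kv => if b.2 < kv.2 then kv else b) it)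

-- ===== PORT A =====
def guess_key (text : String) (key_len : Int) (most_common_plain : String) : String :=
  -- ord(most_common_plain): under Pre_ the string has length 1 wherever this value is reached
  let p := most_common_plain.toList.headD 'a'
  let chars := (PySem.List.pyRange 0 key_len 1).foldl (fun acc i =>
    -- subtext = text[i::key_len]; inside the loop 0 ≤ i < key_len, so the step is nonzero
    let subtext := (PySem.List.slice? text.toList (some i) none key_len).getD []
    let freqs := PySem.Dict.counter subtext
    match mostCommon1 freqs with
    | none => acc ++ ['?']
    | some (mc, _) =>
        acc ++ [Char.ofNat ('a'.toNat + (PySem.Int.mod ((mc.toNat : Int) - (p.toNat : Int)) 26).toNat)]) []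
  String.ofList chars

-- ===== PORT B =====
-- `counts[idx % key_len][ch] += 1`: in-place update of one bucket; the index is mod ∈ [0, key_len),
-- so .toNat is exact (list get + Counter update + put back, ported step for step)
def bucketStep (key_len : Int) (cs : List (PySem.Dict Char Int)) (q : Int × Char) :
    List (PySem.Dict Char Int) :=
  let m := (PySem.Int.mod q.1 key_len).toNat
  cs.set m ((cs.getD m PySem.Dict.empty).modify q.2 0 (· + 1))

def posChar (d : PySem.Dict Char Int) (p : Char) : Char :=
  match mostCommon1 d with
  | none => '?'
  | some (mc, _) => Char.ofNat ('a'.toNat + (PySem.Int.mod ((mc.toNat : Int) - (p.toNat : Int)) 26).toNat)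

def guess_key_alt (text : String) (key_len : Int) (most_common_plain : String) : String :=
  if key_len ≤ 0 then "" else
    let counts := (PySem.List.enumerate text.toList 0).foldl (bucketStep key_len)
      (List.replicate key_len.toNat PySem.Dict.empty)
    String.ofList (counts.map (fun c => posChar c (most_common_plain.toList.headD 'a')))

-- ===== PRECONDITION & SPEC =====
-- Pre_ excludes exactly the inputs where Python A raises TypeError: ord(most_common_plain) is
-- reached (key_len ≥ 1 and text nonempty) while most_common_plain is not a single character.
def Pre_guess_key (text : String) (key_len : Int) (most_common_plain : String) : Prop :=
  most_common_plain.toList.length = 1 ∨ key_len ≤ 0 ∨ text.toList = []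
instance (text : String) (key_len : Int) (most_common_plain : String) : Decidable (Pre_guess_key text key_len most_common_plain) := by unfold Pre_guess_key; infer_instance

def pvWitness_guess_key : String × Int × String := ("abcabc", 3, "e")

def Spec_guess_key (text : String) (key_len : Int) (most_common_plain : String) (out : String) : Prop := out = guess_key_alt text key_len most_common_plain
instance (text : String) (key_len : Int) (most_common_plain : String) (out : String) : Decidable (Spec_guess_key text key_len most_common_plain out) := by unfold Spec_guess_key; infer_instance

-- ===== CLAIM (what is proved, stated in full; the proofs are below) =====
def Claim_equal_guess_key : Prop := ∀ (text : String) (key_len : Int) (most_common_plain : String), Dom_guess_key text key_len most_common_plain → Pre_guess_key text key_len most_common_plain → Spec_guess_key text key_len most_common_plain (guess_key text key_len most_common_plain)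

-- ===== LEMMAS AND PROOFS =====

-- the characters of l (enumerated from s) whose index is ≡ j (mod k): the common description of
-- A's strided slice text[j::k] and of B's bucket j
theorem neg_one_emod (k : Int) (hk : 0 < k) : (-1) % k = k - 1 := by
  rw [show (-1:Int) = k - 1 - k by ring, Int.sub_emod_right]
  exact Int.emod_eq_of_lt (by omega) (by omega)

theorem emod_succ (s k : Int) (hk : 0 < k) :
    (s + 1) % k = if s % k = k - 1 then 0 else s % k + 1 := by
  have h1 : (s + 1) % k = (s % k + 1) % k := (Int.emod_add_emod s k 1).symm
  have hge := Int.emod_nonneg s (show k ≠ 0 by omega)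
  have hlt := Int.emod_lt_of_pos s hk
  split
  next h => rw [h1, h]; simpa using Int.emod_self k
  next h => rw [h1]; exact Int.emod_eq_of_lt (by omega) (by omega)

theorem emod_pred (j k : Int) (hk : 0 < k) (hj : 0 ≤ j) (hjk : j < k) :
    (j - 1) % k = if j = 0 then k - 1 else j - 1 := by
  split
  next h => subst h; simpa using neg_one_emod k hk
  next h => exact Int.emod_eq_of_lt (by omega) (by omega)

theorem emod_succ_iff (s j k : Int) (hk : 0 < k) (hj : 0 ≤ j) (hjk : j < k) :
    ((s + 1) % k = j ↔ s % k = (j - 1) % k) := by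
  rw [emod_succ s k hk, emod_pred j k hk hj hjk]
  have hge := Int.emod_nonneg s (show k ≠ 0 by omega)
  have hlt := Int.emod_lt_of_pos s hk
  split_ifs <;> omega

def subIdx (k : Int) (l : List Char) (s : Int) (j : Int) : List Char :=
  ((PySem.List.enumerate l s).filter (fun q => PySem.Int.mod q.1 k == j)).map (·.2)

theorem subIdx_nil (k s j : Int) : subIdx k [] s j = [] := rfl

theorem subIdx_cons (k : Int) (x : Char) (t : List Char) (s j : Int) :
    subIdx k (x :: t) s j =
      (if PySem.Int.mod s k == j then [x] else []) ++ subIdx k t (s + 1) j := by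
  simp only [subIdx, PySem.List.enumerate_cons, List.filter_cons]
  split <;> simp_all

theorem subIdx_shift (k : Int) (hk : 0 < k) (l : List Char) (s j : Int)
    (hj : 0 ≤ j) (hjk : j < k) :
    subIdx k l (s + 1) j = subIdx k l s ((j - 1) % k) := by
  induction l generalizing s with
  | nil => simp [subIdx_nil]
  | cons x t ih =>
    rw [subIdx_cons, subIdx_cons, ih (s + 1)]
    congr 1
    have hmod : ∀ a : Int, PySem.Int.mod a k = a % k := fun a => PySem.Int.mod_eq_emod_of_pos hk
    simp only [hmod]
    have hiff := emod_succ_iff s j k hk hj hjk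
    by_cases h : (s + 1) % k = j
    · simp [h, (hiff.mp h)]
    · have h2 : ¬ (s % k = (j - 1) % k) := fun hc => h (hiff.mpr hc)
      simp [h, h2]

theorem slice?_nil (j k : Int) (hj : 0 ≤ j) (hk : 0 < k) :
    PySem.List.slice? ([] : List Char) (some j) none k = some [] := by
  simp only [PySem.List.slice?, PySem.List.sliceIndices]
  have h0 : ¬ (k = 0) := by omega
  have h1 : ¬ (k < 0) := by omega
  have h2 : ¬ (j < 0) := by omega
  simp [h0, h1, h2]

theorem slice?_cons_pos (x : Char) (t : List Char) (j k : Int) (hj : 1 ≤ j) (hk : 0 < k) :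
    PySem.List.slice? (x :: t) (some j) none k = PySem.List.slice? t (some (j - 1)) none k := by
  simp only [PySem.List.slice?, PySem.List.sliceIndices]
  have h0 : ¬ (k = 0) := by omega
  have h1 : ¬ (k < 0) := by omega
  have h2 : ¬ (j < 0) := by omega
  have h3 : ¬ (j - 1 < 0) := by omega
  simp only [h0, h1, h2, h3, if_false, List.length_cons]
  push_cast
  set n : Int := (t.length : Int) with hn
  have hstart : min j (n + 1) = min (j - 1) n + 1 := by omega
  have hs2 : 0 ≤ min (j - 1) n ∨ n < 0 := by omega
  have hnn : 0 ≤ n := by positivity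
  have hcond : (min j (n+1) < n + 1) = (min (j-1) n < n) := by
    by_cases h : min (j-1) n < n <;> simp [h] <;> omega
  rw [hstart]
  simp only [if_pos hk]
  congr 1
  by_cases hlt : min (j - 1) n < n
  · have hc2 : min (j - 1) n + 1 < n + 1 := by omega
    simp only [if_pos hlt, if_pos hc2]
    have hnum : (n + 1 - (min (j - 1) n + 1) + k - 1) / k = (n - min (j - 1) n + k - 1) / k := by
      ring_nf
    rw [hnum]
    apply List.filterMap_congr
    intro m _
    have hkm : (0:Int) ≤ k * (m : Int) := by positivity
    have hmin : 0 ≤ min (j - 1) n := by omega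
    have htn : (min (j - 1) n + 1 + k * (m:Int)).toNat = (min (j - 1) n + k * (m:Int)).toNat + 1 := by
      omega
    rw [htn, List.getElem?_cons_succ]
  · have hc2 : ¬ (min (j - 1) n + 1 < n + 1) := by omega
    simp [show ¬ (j ≤ n) by omega]

theorem slice?_cons_zero (x : Char) (t : List Char) (k : Int) (hk : 0 < k) :
    PySem.List.slice? (x :: t) (some 0) none k =
      (PySem.List.slice? t (some (k - 1)) none k).map (x :: ·) := by
  simp only [PySem.List.slice?, PySem.List.sliceIndices]
  have h0 : ¬ (k = 0) := by omega
  have h1 : ¬ (k < 0) := by omega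
  have h3 : ¬ (k - 1 < 0) := by omega
  simp only [h0, h1, h3, if_false, List.length_cons, if_pos hk]
  push_cast
  set n : Int := (t.length : Int) with hn
  have hnn : 0 ≤ n := by positivity
  have hs1 : min (0:Int) (n + 1) = 0 := by omega
  have hmin0 : ¬ ((0:Int) < 0) := by omega
  simp only [hs1, hmin0, Option.map_some]
  have hc1 : (0:Int) < n + 1 := by omega
  simp only [if_pos hc1]
  by_cases hbig : k - 1 < n
  · -- position k-1 exists in t
    have hs2 : min (k - 1) n = k - 1 := by omega
    rw [hs2, if_pos hbig]
    have hnum1 : (n + 1 - 0 + k - 1) / k = n / k + 1 := by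
      rw [show n + 1 - 0 + k - 1 = n + 1 * k by ring, Int.add_mul_ediv_right _ _ h0]
    have hnum2 : (n - (k - 1) + k - 1) / k = n / k := by ring_nf
    rw [hnum1, hnum2]
    have hdnn : 0 ≤ n / k := Int.ediv_nonneg hnn (by omega)
    have htn : (n / k + 1).toNat = (n / k).toNat + 1 := by omega
    rw [htn, List.range_succ_eq_map, List.filterMap_cons, List.filterMap_map]
    have h00 : ((0:Int) + k * (0:Nat)).toNat = 0 := by simp
    simp only [h00, List.getElem?_cons_zero]
    have hfun : List.filterMap ((fun m : Nat => (x :: t)[((0:Int) + k * (m:Int)).toNat]?) ∘ Nat.succ)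
        (List.range (n / k).toNat) =
        List.filterMap (fun m : Nat => t[(k - 1 + k * (m:Int)).toNat]?) (List.range (n / k).toNat) := by
      apply List.filterMap_congr
      intro m _
      simp only [Function.comp]
      have hkm : (0:Int) ≤ k * (m : Int) := by positivity
      have htn2 : ((0:Int) + k * ((Nat.succ m : Nat) : Int)).toNat = (k - 1 + k * (m:Int)).toNat + 1 := by
        push_cast
        have : k * ((m:Int) + 1) = (k - 1 + k * (m:Int)) + 1 := by ring
        omega
      rw [htn2, List.getElem?_cons_succ]
    rw [hfun]
  · -- t too short: the slice of t is empty, the whole slice is [x]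
    have hs2 : min (k - 1) n = n := by omega
    rw [hs2]
    have hlt : ¬ (n < n) := by omega
    rw [if_neg hlt]
    have hnum1 : (n + 1 - 0 + k - 1) / k = 1 := by
      rw [show n + 1 - 0 + k - 1 = n + 1 * k by ring, Int.add_mul_ediv_right _ _ h0,
        Int.ediv_eq_zero_of_lt hnn (by omega)]
      norm_num
    rw [hnum1]
    simp
theorem slice?_eq_subIdx (k : Int) (hk : 0 < k) :
    ∀ (l : List Char) (j : Int), 0 ≤ j → j < k →
      PySem.List.slice? l (some j) none k = some (subIdx k l 0 j) := by
  intro l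
  induction l with
  | nil => intro j hj hjk; rw [slice?_nil j k hj hk, subIdx_nil]
  | cons x t ih =>
    intro j hj hjk
    have hmod0 : PySem.Int.mod 0 k = 0 := by
      rw [PySem.Int.mod_eq_emod_of_pos hk]; simp
    by_cases h0 : j = 0
    · subst h0
      rw [slice?_cons_zero x t k hk, ih (k - 1) (by omega) (by omega),
        subIdx_cons, hmod0]
      norm_num
      have hshift := subIdx_shift k hk t 0 0 (by omega) (by omega)
      norm_num at hshift
      rw [neg_one_emod k hk] at hshift
      rw [hshift]
    · rw [slice?_cons_pos x t j k (by omega) hk, ih (j - 1) (by omega) (by omega),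
        subIdx_cons, hmod0]
      norm_num
      have hshift := subIdx_shift k hk t 0 j (by omega) hjk
      norm_num at hshift
      rw [Int.emod_eq_of_lt (by omega) (by omega)] at hshift
      rw [hshift, if_neg (by omega : ¬ (0:Int) = j)]
      simp

def extendC (d : PySem.Dict Char Int) (xs : List Char) : PySem.Dict Char Int :=
  xs.foldl (fun d x => d.modify x 0 (· + 1)) d

theorem bfold (k : Int) (hk : 0 < k) :
    ∀ (l : List Char) (s : Int), 0 ≤ s → ∀ (cs : List (PySem.Dict Char Int)),
      cs.length = k.toNat →
      (PySem.List.enumerate l s).foldl (bucketStep k) cs =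
        cs.mapIdx (fun j d => extendC d (subIdx k l s (j : Int))) := by
  intro l
  induction l with
  | nil =>
    intro s hs cs hlen
    simp only [PySem.List.enumerate, List.foldl_nil]
    apply List.ext_getElem
    · simp
    · intro i h1 h2
      simp [List.getElem_mapIdx, subIdx_nil, extendC]
  | cons x t ih =>
    intro s hs cs hlen
    rw [PySem.List.enumerate_cons, List.foldl_cons]
    have hmnn : 0 ≤ PySem.Int.mod s k := by
      rw [PySem.Int.mod_eq_emod_of_pos hk]; exact Int.emod_nonneg s (by omega)
    have hmlt : PySem.Int.mod s k < k := by
      rw [PySem.Int.mod_eq_emod_of_pos hk]; exact Int.emod_lt_of_pos s hk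
    set m : Nat := (PySem.Int.mod s k).toNat with hm
    have hmk : m < k.toNat := by omega
    have hlen' : (bucketStep k cs (s, x)).length = k.toNat := by
      simp [bucketStep, hlen]
    rw [ih (s + 1) (by omega) _ hlen']
    apply List.ext_getElem
    · simp [hlen', hlen]
    · intro j h1 h2
      simp only [List.getElem_mapIdx]
      have hjk : j < k.toNat := by simpa [hlen'] using h1
      have hjcs : j < cs.length := by omega
      rw [subIdx_cons]
      by_cases hej : m = j
      · -- this character lands in bucket j
        have hcond : (PySem.Int.mod s k == (j : Int)) = true := by
          simp [← hej, hm]; omega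
        rw [hcond]
        simp only [if_pos]
        have hget : (bucketStep k cs (s, x))[j] =
            cs[j].modify x 0 (· + 1) := by
          simp only [bucketStep, ← hm, ← hej]
          rw [List.getElem_set_self]
          · congr 1
            exact List.getD_eq_getElem cs _ (by omega)
        rw [hget]
        rfl
      · have hcond : (PySem.Int.mod s k == (j : Int)) = false := by
          simp [hm]; omega
        rw [hcond]
        have hget : (bucketStep k cs (s, x))[j] = cs[j] := by
          simp only [bucketStep, ← hm]
          rw [List.getElem_set_ne (by omega)]
        rw [hget]
        simp

theorem guess_key_eq (text : String) (key_len : Int) (most_common_plain : String) :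
    guess_key text key_len most_common_plain = guess_key_alt text key_len most_common_plain := by
  unfold guess_key guess_key_alt
  set p := most_common_plain.toList.headD 'a' with hp
  by_cases hk : key_len ≤ 0
  · rw [if_pos hk]
    have hr : PySem.List.pyRange 0 key_len 1 = [] := by
      rw [PySem.List.pyRange_of_pos 0 key_len (by omega : (0:Int) < 1)]
      rw [if_neg (by omega : ¬ (0:Int) < key_len)]
      simp
    rw [hr]
    rfl
  · rw [if_neg hk]
    have hkpos : 0 < key_len := by omega
    -- A's loop body appends one character per position
    have hbody : ∀ (acc : List Char) (i : Int),
        (let subtext := (PySem.List.slice? text.toList (some i) none key_len).getD []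
         let freqs := PySem.Dict.counter subtext
         match mostCommon1 freqs with
         | none => acc ++ ['?']
         | some (mc, _) =>
             acc ++ [Char.ofNat ('a'.toNat + (PySem.Int.mod ((mc.toNat : Int) - (p.toNat : Int)) 26).toNat)]) =
        acc ++ [posChar (PySem.Dict.counter ((PySem.List.slice? text.toList (some i) none key_len).getD [])) p] := by
      intro acc i
      simp only [posChar]
      cases mostCommon1 (PySem.Dict.counter ((PySem.List.slice? text.toList (some i) none key_len).getD [])) with
      | none => rfl
      | some mc => rfl
    simp only [hbody]
    rw [PySem.List.foldl_append_singleton_eq_map, List.nil_append,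
      bfold key_len hkpos text.toList 0 (by omega) _ (by simp)]
    congr 1
    lift key_len to Nat using (by omega : (0:Int) ≤ key_len) with K hKl
    rw [PySem.List.pyRange_zero_natCast, List.map_map]
    apply List.ext_getElem
    · simp
    · intro j h1 h2
      have hjK : j < K := by simpa using h1
      simp only [List.getElem_map, List.getElem_range, List.getElem_mapIdx,
        List.getElem_replicate, Function.comp]
      rw [slice?_eq_subIdx (K:Int) (by omega) text.toList (j:Int) (by omega) (by exact_mod_cast hjK)]
      rfl

-- ===== VERDICT (by name: the statement is the Claim_ definition above) =====
theorem guess_key_spec : Claim_equal_guess_key := by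
  intro text key_len most_common_plain _ _
  unfold Spec_guess_key
  exact guess_key_eq text key_len most_common_plain
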